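-- pv_equiv track=rewrite | github.com/PurkkaKoodari/physcalc | physcalc/value.py | _cancel_unit_parts
-- ===== SOURCE A (Python) =====
-- def _cancel_unit_parts(num, denom):
--     num_list = sorted(num)
--     denom_list = sorted(denom)
--     num_i = denom_i = 0
--     while num_i < len(num_list) and denom_i < len(denom_list):
--         num_unit = num_list[num_i]
--         denom_unit = denom_list[denom_i]
--         if num_unit == denom_unit:
--             del num_list[num_i]
--             del denom_list[denom_i]
--         elif num_unit < denom_unit:
--             num_i += 1
--         else:
--             denom_i += 1
--     return tuple(num_list), tuple(denom_list)
-- ===== SOURCE B (Python) =====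
-- def _cancel_unit_parts(num, denom):
--     counts = {}
--     for x in num:
--         counts[x] = counts.get(x, 0) + 1
--     for x in denom:
--         counts[x] = counts.get(x, 0) - 1
--     num_out = []
--     denom_out = []
--     for x, c in counts.items():
--         if c > 0:
--             num_out.extend([x] * c)
--         else:
--             denom_out.extend([x] * -c)
--     return tuple(sorted(num_out)), tuple(sorted(denom_out))
-- ===== Notes on version B (the rewrite author's own statement) =====
-- stated objective: faster
-- what changed: Replaces sort-both-lists plus a cancellation loop that repeatedly deletes matched elements with del (each deletion O(n)) by a single hash-dict of signed counts built in one pass over both lists, emitting each surviving element with its leftover multiplicity and sorting the two survivor lists.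
import Mathlib
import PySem

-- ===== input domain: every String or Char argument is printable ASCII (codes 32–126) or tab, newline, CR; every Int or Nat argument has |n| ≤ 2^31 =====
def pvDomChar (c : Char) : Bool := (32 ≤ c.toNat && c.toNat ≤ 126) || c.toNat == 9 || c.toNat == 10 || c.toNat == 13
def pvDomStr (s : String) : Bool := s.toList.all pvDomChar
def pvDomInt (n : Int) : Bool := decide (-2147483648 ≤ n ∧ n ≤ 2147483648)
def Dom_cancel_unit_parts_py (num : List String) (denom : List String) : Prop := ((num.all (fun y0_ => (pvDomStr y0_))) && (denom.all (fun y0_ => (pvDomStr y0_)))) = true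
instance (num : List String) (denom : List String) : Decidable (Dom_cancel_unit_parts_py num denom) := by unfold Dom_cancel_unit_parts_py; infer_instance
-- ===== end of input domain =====

-- B replaces A's sort-then-cancel-with-deletion loop by a single dict of signed counts
-- whose surviving multiplicities are emitted and sorted (objective: faster on duplicate-heavy inputs).


-- ===== PORT A =====
-- A's while loop: state (num_list, denom_list, num_i, denom_i); `del lst[i]` = List.eraseIdx
def cancelLoopA (nl : List String) (dl : List String) (ni : Nat) (di : Nat) :
    List String × List String :=
  if h : ni < nl.length ∧ di < dl.length then
    let nu := nl[ni]'h.1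
    let du := dl[di]'h.2
    if nu = du then
      cancelLoopA (nl.eraseIdx ni) (dl.eraseIdx di) ni di
    else if nu < du then
      cancelLoopA nl dl (ni + 1) di
    else
      cancelLoopA nl dl ni (di + 1)
  else (nl, dl)
termination_by (nl.length - ni) + (dl.length - di)
decreasing_by
  · simp only [List.length_eraseIdx, if_pos h.1, if_pos h.2]; omega
  · omega
  · omega

def cancel_unit_parts_py (num : List String) (denom : List String) : List String × List String :=
  cancelLoopA (PySem.List.sorted num (fun x => x) false)
    (PySem.List.sorted denom (fun x => x) false) 0 0

-- ===== PORT B =====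
def cancel_unit_parts_py_alt (num : List String) (denom : List String) : List String × List String :=
  let counts : PySem.Dict String Int :=
    num.foldl (fun d x => d.modify x 0 (· + 1)) PySem.Dict.empty
  let counts := denom.foldl (fun d x => d.modify x 0 (· - 1)) counts
  let outs := counts.items.foldl
    (fun (acc : List String × List String) p =>
      if p.2 > 0 then (acc.1 ++ List.replicate p.2.toNat p.1, acc.2)
      else (acc.1, acc.2 ++ List.replicate (-p.2).toNat p.1)) ([], [])
  (PySem.List.sorted outs.1 (fun x => x) false, PySem.List.sorted outs.2 (fun x => x) false)

-- ===== PRECONDITION & SPEC =====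
def Spec_cancel_unit_parts_py (num : List String) (denom : List String) (out : List String × List String) : Prop := out = cancel_unit_parts_py_alt num denom
instance (num : List String) (denom : List String) (out : List String × List String) : Decidable (Spec_cancel_unit_parts_py num denom out) := by unfold Spec_cancel_unit_parts_py; infer_instance

-- ===== CLAIM (what is proved, stated in full; the proofs are below) =====
def Claim_equal_cancel_unit_parts_py : Prop := ∀ (num : List String) (denom : List String), Dom_cancel_unit_parts_py num denom → Spec_cancel_unit_parts_py num denom (cancel_unit_parts_py num denom)

-- ===== LEMMAS AND PROOFS =====

-- structural two-pointer recursion describing A's loop from indices (ni, di) on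
def mergeDiff : List String → List String → List String × List String
  | [], ys => ([], ys)
  | x :: xs, [] => (x :: xs, [])
  | x :: xs, y :: ys =>
    if x = y then mergeDiff xs ys
    else if x < y then
      let r := mergeDiff xs (y :: ys); (x :: r.1, r.2)
    else
      let r := mergeDiff (x :: xs) ys; (r.1, y :: r.2)

lemma mergeDiff_eq_eq (x : String) (xs ys : List String) :
    mergeDiff (x :: xs) (x :: ys) = mergeDiff xs ys := by simp [mergeDiff]

lemma mergeDiff_eq_lt {x y : String} (xs ys : List String) (hne : ¬x = y) (hlt : x < y) :
    mergeDiff (x :: xs) (y :: ys)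
      = (x :: (mergeDiff xs (y :: ys)).1, (mergeDiff xs (y :: ys)).2) := by
  simp [mergeDiff, hne, hlt]

lemma mergeDiff_eq_gt {x y : String} (xs ys : List String) (hne : ¬x = y) (hnlt : ¬x < y) :
    mergeDiff (x :: xs) (y :: ys)
      = ((mergeDiff (x :: xs) ys).1, y :: (mergeDiff (x :: xs) ys).2) := by
  simp [mergeDiff, hne, hnlt]

lemma mergeDiff_nil_right (u : List String) : mergeDiff u [] = (u, []) := by
  cases u <;> simp [mergeDiff]

lemma mergeDiff_sublist : ∀ (xs ys : List String),
    (mergeDiff xs ys).1.Sublist xs ∧ (mergeDiff xs ys).2.Sublist ys := by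
  intro xs ys
  induction xs, ys using mergeDiff.induct with
  | case1 ys => simp [mergeDiff]
  | case2 x xs => simp [mergeDiff]
  | case3 xs y ys ih =>
    rw [mergeDiff_eq_eq]
    exact ⟨ih.1.cons _, ih.2.cons _⟩
  | case4 x xs y ys hne hlt ih =>
    rw [mergeDiff_eq_lt _ _ hne hlt]
    exact ⟨ih.1.cons₂ _, ih.2⟩
  | case5 x xs y ys hne hnlt ih =>
    rw [mergeDiff_eq_gt _ _ hne hnlt]
    exact ⟨ih.1, ih.2.cons₂ _⟩

lemma mergeDiff_count : ∀ (xs ys : List String),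
    xs.Pairwise (· ≤ ·) → ys.Pairwise (· ≤ ·) → ∀ c : String,
      (mergeDiff xs ys).1.count c = xs.count c - ys.count c ∧
      (mergeDiff xs ys).2.count c = ys.count c - xs.count c := by
  intro xs ys
  induction xs, ys using mergeDiff.induct with
  | case1 ys => intro _ _ c; simp [mergeDiff]
  | case2 x xs => intro _ _ c; simp [mergeDiff]
  | case3 xs y ys ih =>
    intro hx hy c
    obtain ⟨h1, h2⟩ := ih hx.tail hy.tail c
    rw [mergeDiff_eq_eq]
    simp only [List.count_cons, h1, h2]
    by_cases hc : y = c <;> simp [hc]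
  | case4 x xs y ys hne hlt ih =>
    intro hx hy c
    have hyx : ¬ y = x := fun h => hne h.symm
    have hys0 : List.count x ys = 0 := by
      rw [List.count_eq_zero]; intro hmem
      exact absurd hlt (not_lt.mpr ((List.pairwise_cons.mp hy).1 x hmem))
    obtain ⟨h1, h2⟩ := ih hx.tail hy c
    rw [mergeDiff_eq_lt _ _ hne hlt]
    simp only [List.count_cons] at h1 h2 ⊢
    by_cases hcx : x = c
    · subst hcx
      simp [hyx] at h1 h2 ⊢
      omega
    · by_cases hcy : y = c <;> simp [hcx, hcy] at h1 h2 ⊢ <;> omega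
  | case5 x xs y ys hne hnlt ih =>
    intro hx hy c
    have hylt : y < x := lt_of_le_of_ne (not_lt.mp hnlt) (fun h => hne h.symm)
    have hxs0 : List.count y xs = 0 := by
      rw [List.count_eq_zero]; intro hmem
      exact absurd hylt (not_lt.mpr ((List.pairwise_cons.mp hx).1 y hmem))
    obtain ⟨h1, h2⟩ := ih hx hy.tail c
    rw [mergeDiff_eq_gt _ _ hne hnlt]
    simp only [List.count_cons] at h1 h2 ⊢
    by_cases hcy : y = c
    · subst hcy
      simp [hne] at h1 h2 ⊢
      omega
    · by_cases hcx : x = c <;> simp [hcx, hcy] at h1 h2 ⊢ <;> omega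

lemma cancelLoopA_eq_mergeDiff : ∀ (nl dl : List String) (ni di : Nat),
    cancelLoopA nl dl ni di =
      (nl.take ni ++ (mergeDiff (nl.drop ni) (dl.drop di)).1,
       dl.take di ++ (mergeDiff (nl.drop ni) (dl.drop di)).2) := by
  intro nl dl ni di
  induction nl, dl, ni, di using cancelLoopA.induct with
  | case1 nl dl ni di h nu du heq ih =>
    have heq' : nl[ni]'h.1 = dl[di]'h.2 := heq
    rw [cancelLoopA]
    rw [dif_pos h, if_pos heq', ih]
    rw [List.eraseIdx_eq_take_drop_succ, List.eraseIdx_eq_take_drop_succ]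
    have hln : (nl.take ni).length = ni := by simp [List.length_take]; omega
    have hld : (dl.take di).length = di := by simp [List.length_take]; omega
    rw [List.take_left' hln, List.take_left' hld, List.drop_left' hln, List.drop_left' hld]
    rw [List.drop_eq_getElem_cons h.1, List.drop_eq_getElem_cons h.2, heq', mergeDiff_eq_eq]
  | case2 nl dl ni di h nu du hne hlt ih =>
    have hne' : ¬ nl[ni]'h.1 = dl[di]'h.2 := hne
    have hlt' : nl[ni]'h.1 < dl[di]'h.2 := hlt
    rw [cancelLoopA]
    rw [dif_pos h, if_neg hne', if_pos hlt', ih]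
    rw [List.drop_eq_getElem_cons h.1, List.drop_eq_getElem_cons h.2,
        mergeDiff_eq_lt _ _ hne' hlt']
    have : nl.take (ni + 1) = nl.take ni ++ [nl[ni]'h.1] := by
      rw [List.take_add_one, List.getElem?_eq_getElem h.1]; rfl
    rw [this, List.append_assoc, List.singleton_append]
  | case3 nl dl ni di h nu du hne hnlt ih =>
    have hne' : ¬ nl[ni]'h.1 = dl[di]'h.2 := hne
    have hnlt' : ¬ nl[ni]'h.1 < dl[di]'h.2 := hnlt
    rw [cancelLoopA]
    rw [dif_pos h, if_neg hne', if_neg hnlt', ih]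
    rw [List.drop_eq_getElem_cons h.1, List.drop_eq_getElem_cons h.2,
        mergeDiff_eq_gt _ _ hne' hnlt']
    have : dl.take (di + 1) = dl.take di ++ [dl[di]'h.2] := by
      rw [List.take_add_one, List.getElem?_eq_getElem h.2]; rfl
    rw [this, List.append_assoc, List.singleton_append]
  | case4 nl dl ni di h =>
    rw [cancelLoopA, dif_neg h]
    rcases not_and_or.mp h with h1 | h2
    · have hn : nl.length ≤ ni := le_of_not_gt h1
      rw [List.drop_eq_nil_of_le hn, List.take_of_length_le hn]
      simp [mergeDiff]
    · have hd : dl.length ≤ di := le_of_not_gt h2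
      rw [List.drop_eq_nil_of_le hd, List.take_of_length_le hd, mergeDiff_nil_right]
      simp

-- ===== B-side lemmas =====

lemma foldl_pair_flatMap (l : List (String × Int)) :
    ∀ (a b : List String),
      l.foldl (fun (acc : List String × List String) p =>
        if p.2 > 0 then (acc.1 ++ List.replicate p.2.toNat p.1, acc.2)
        else (acc.1, acc.2 ++ List.replicate (-p.2).toNat p.1)) (a, b)
      = (a ++ l.flatMap (fun p => if p.2 > 0 then List.replicate p.2.toNat p.1 else []),
         b ++ l.flatMap (fun p => if p.2 > 0 then [] else List.replicate (-p.2).toNat p.1)) := by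
  induction l with
  | nil => simp
  | cons p l ih =>
    intro a b
    by_cases hp : p.2 > 0 <;> simp [hp, ih, List.flatMap_cons]

lemma count_flatMap_self (F : String → List String)
    (hF : ∀ k c, ¬ c = k → (F k).count c = 0) :
    ∀ ks : List String, ks.Nodup → ∀ c,
      (ks.flatMap F).count c = if c ∈ ks then (F c).count c else 0 := by
  intro ks
  induction ks with
  | nil => simp
  | cons k ks ih =>
    intro hnd c
    rw [List.flatMap_cons, List.count_append, ih hnd.of_cons c]
    by_cases hc : c = k
    · subst hc
      have : c ∉ ks := (List.nodup_cons.mp hnd).1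
      simp [this]
    · simp [hF k c hc, hc]

def cntsD (num denom : List String) : PySem.Dict String Int :=
  denom.foldl (fun d x => d.modify x 0 (· - 1))
    (num.foldl (fun d x => d.modify x 0 (· + 1)) PySem.Dict.empty)

lemma getD_foldl_modify_sub_one (l : List String) (v : String) :
    ∀ (d : PySem.Dict String Int),
      (l.foldl (fun d x => d.modify x 0 (· - 1)) d).getD v 0 = d.getD v 0 - l.count v := by
  induction l with
  | nil => simp
  | cons x xs ih =>
    intro d
    simp only [List.foldl_cons, ih, PySem.Dict.getD_modify, List.count_cons]
    by_cases hx : v = x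
    · simp [hx]; ring
    · simp [hx, Ne.symm hx]

lemma cntsD_getD (num denom : List String) (c : String) :
    (cntsD num denom).getD c 0 = (num.count c : Int) - (denom.count c : Int) := by
  rw [cntsD, getD_foldl_modify_sub_one, PySem.Dict.getD_foldl_modify_add_one]
  simp

lemma cntsD_nodup_keys (num denom : List String) : (cntsD num denom).keys.Nodup := by
  rw [cntsD]
  apply PySem.Dict.nodup_keys_foldl_modify_key denom (fun x => x) 0 (fun _ _ v => v - 1)
  apply PySem.Dict.nodup_keys_foldl_modify_key num (fun x => x) 0 (fun _ _ v => v + 1)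
  simp

lemma mem_cntsD_keys (num denom : List String) (c : String) (hc : c ∈ num ∨ c ∈ denom) :
    c ∈ (cntsD num denom).keys := by
  rw [cntsD, PySem.Dict.keys_foldl_modify, PySem.Dict.keys_foldl_modify]
  rw [PySem.Set.mem_update, PySem.Set.mem_update]
  rcases hc with h | h
  · exact Or.inl (Or.inr h)
  · exact Or.inr h

lemma cancel_eq_alt (num denom : List String) :
    cancel_unit_parts_py num denom = cancel_unit_parts_py_alt num denom := by
  have hsn := PySem.List.sorted_pairwise num (fun x => x)
  have hsd := PySem.List.sorted_pairwise denom (fun x => x)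
  have hA : cancel_unit_parts_py num denom
      = mergeDiff (PySem.List.sorted num (fun x => x) false)
          (PySem.List.sorted denom (fun x => x) false) := by
    rw [cancel_unit_parts_py, cancelLoopA_eq_mergeDiff]
    simp
  -- counts of A's two outputs
  have hAc : ∀ c : String,
      (cancel_unit_parts_py num denom).1.count c = num.count c - denom.count c ∧
      (cancel_unit_parts_py num denom).2.count c = denom.count c - num.count c := by
    intro c
    have h := mergeDiff_count _ _ hsn hsd c
    rw [(PySem.List.sorted_perm num (fun x => x) false).count_eq,
        (PySem.List.sorted_perm denom (fun x => x) false).count_eq] at h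
    rw [hA]
    exact h
  -- A's outputs are sorted
  have hApw1 : (cancel_unit_parts_py num denom).1.Pairwise (· ≤ ·) := by
    rw [hA]; exact hsn.sublist (mergeDiff_sublist _ _).1
  have hApw2 : (cancel_unit_parts_py num denom).2.Pairwise (· ≤ ·) := by
    rw [hA]; exact hsd.sublist (mergeDiff_sublist _ _).2
  -- B's pre-sort lists and their counts
  have hnd := cntsD_nodup_keys num denom
  have hBc : ∀ c : String,
      ((cntsD num denom).items.flatMap
        (fun p => if p.2 > 0 then List.replicate p.2.toNat p.1 else [])).count c
        = num.count c - denom.count c ∧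
      ((cntsD num denom).items.flatMap
        (fun p => if p.2 > 0 then [] else List.replicate (-p.2).toNat p.1)).count c
        = denom.count c - num.count c := by
    intro c
    rw [PySem.Dict.items_eq_map_keys (cntsD num denom) hnd 0]
    simp only [List.flatMap_map]
    rw [count_flatMap_self
        (fun k => if (cntsD num denom).getD k 0 > 0
          then List.replicate ((cntsD num denom).getD k 0).toNat k else [])
        (by intro k c hck
            have hkc : ¬ k = c := fun hh => hck hh.symm
            by_cases h : (cntsD num denom).getD k 0 > 0 <;>
              simp [h, List.count_replicate, hkc])
        _ hnd c,
      count_flatMap_self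
        (fun k => if (cntsD num denom).getD k 0 > 0
          then [] else List.replicate (-(cntsD num denom).getD k 0).toNat k)
        (by intro k c hck
            have hkc : ¬ k = c := fun hh => hck hh.symm
            by_cases h : (cntsD num denom).getD k 0 > 0 <;>
              simp [h, List.count_replicate, hkc])
        _ hnd c]
    by_cases hmem : c ∈ (cntsD num denom).keys
    · have hv := cntsD_getD num denom c
      by_cases hpos : (cntsD num denom).getD c 0 > 0 <;>
        simp [hmem, hpos, List.count_replicate] <;> omega
    · have hcn : c ∉ num := fun h => hmem (mem_cntsD_keys num denom c (Or.inl h))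
      have hcd : c ∉ denom := fun h => hmem (mem_cntsD_keys num denom c (Or.inr h))
      simp [hmem, List.count_eq_zero.mpr hcn, List.count_eq_zero.mpr hcd]
  -- assemble
  have halt : cancel_unit_parts_py_alt num denom
      = (PySem.List.sorted ((cntsD num denom).items.flatMap
            (fun p => if p.2 > 0 then List.replicate p.2.toNat p.1 else [])) (fun x => x) false,
         PySem.List.sorted ((cntsD num denom).items.flatMap
            (fun p => if p.2 > 0 then [] else List.replicate (-p.2).toNat p.1)) (fun x => x) false) := by
    simp only [cancel_unit_parts_py_alt, foldl_pair_flatMap, List.nil_append]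
    rfl
  have h1 : PySem.List.sorted ((cntsD num denom).items.flatMap
        (fun p => if p.2 > 0 then List.replicate p.2.toNat p.1 else [])) (fun x => x) false
      = (cancel_unit_parts_py num denom).1 :=
    PySem.List.sorted_id_eq_of_perm_of_pairwise _ _
      (List.perm_iff_count.mpr (fun c => by rw [(hAc c).1, (hBc c).1])) hApw1
  have h2 : PySem.List.sorted ((cntsD num denom).items.flatMap
        (fun p => if p.2 > 0 then [] else List.replicate (-p.2).toNat p.1)) (fun x => x) false
      = (cancel_unit_parts_py num denom).2 :=
    PySem.List.sorted_id_eq_of_perm_of_pairwise _ _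
      (List.perm_iff_count.mpr (fun c => by rw [(hAc c).2, (hBc c).2])) hApw2
  rw [halt, h1, h2]

-- ===== VERDICT (by name: the statement is the Claim_ definition above) =====
theorem cancel_unit_parts_py_spec : Claim_equal_cancel_unit_parts_py := by
  intro num denom _
  show cancel_unit_parts_py num denom = cancel_unit_parts_py_alt num denom
  exact cancel_eq_alt num denom
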